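-- pv_equiv track=rewrite | github.com/tadzhnahal/analytics-impact-map | backend/analysis.py | collect_affected_ids
-- ===== SOURCE A (Python) =====
-- def collect_affected_ids(root_id, graph):
--     queue = []
--     visited = set()
--     result = []
--
--     if root_id in graph:
--         for item in graph[root_id]:
--             queue.append(item)
--
--     while queue:
--         current_id = queue.pop(0)
--
--         if current_id in visited:
--             continue
--
--         visited.add(current_id)
--         result.append(current_id)
--
--         if current_id in graph:
--             for next_id in graph[current_id]:
--                 if next_id not in visited:
--                     queue.append(next_id)
--
--     return result
-- ===== SOURCE B (Python) =====
-- def collect_affected_ids(root_id, graph):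
--     # The result list doubles as the BFS queue (index pointer), deduplicating
--     # at enqueue time instead of at dequeue time: no separate queue, no pop(0),
--     # no duplicate queue entries.
--     result = []
--     enqueued = set()
--     for n in graph.get(root_id, []):
--         if n not in enqueued:
--             enqueued.add(n)
--             result.append(n)
--     i = 0
--     while i < len(result):
--         for n in graph.get(result[i], []):
--             if n not in enqueued:
--                 enqueued.add(n)
--                 result.append(n)
--         i += 1
--     return result
-- ===== Notes on version B (the rewrite author's own statement) =====
-- stated objective: alternative
-- what changed: Replaces the pop(0) FIFO queue with dedup-at-dequeue by an index pointer into the result list itself with dedup-at-enqueue, so there is no separate queue, no list shifting and no duplicate queue entries.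
import Mathlib
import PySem

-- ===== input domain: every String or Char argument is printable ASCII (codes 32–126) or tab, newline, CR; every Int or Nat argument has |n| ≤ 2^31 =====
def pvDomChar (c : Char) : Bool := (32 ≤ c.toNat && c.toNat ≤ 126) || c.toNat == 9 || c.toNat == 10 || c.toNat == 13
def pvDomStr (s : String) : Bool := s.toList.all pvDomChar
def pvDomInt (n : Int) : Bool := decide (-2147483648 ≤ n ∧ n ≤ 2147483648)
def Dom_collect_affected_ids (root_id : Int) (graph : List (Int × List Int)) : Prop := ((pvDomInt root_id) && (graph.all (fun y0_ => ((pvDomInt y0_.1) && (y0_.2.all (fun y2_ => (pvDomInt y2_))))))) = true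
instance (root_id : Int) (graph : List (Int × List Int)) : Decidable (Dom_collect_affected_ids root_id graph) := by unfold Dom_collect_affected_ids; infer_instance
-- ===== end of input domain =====

-- B replaces A's pop(0)/dedup-at-dequeue FIFO queue by an index pointer into the
-- result list itself with dedup-at-enqueue (objective: alternative — no separate
-- queue, no duplicate queue entries).

-- shared helper: first-match lookup in the association list (Python 'k in d' / 'd[k]' / 'd.get(k, [])')
def pvLookup : List (Int × List Int) → Int → Option (List Int)
  | [], _ => none
  | (k, v) :: rest, c => if k == c then some v else pvLookup rest c

-- lemmas cited by the termination proofs of the two ports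
theorem pvLookup_mem {graph : List (Int × List Int)} {c : Int} {l : List Int}
    (h : pvLookup graph c = some l) : ∀ n ∈ l, n ∈ graph.flatMap Prod.snd := by
  induction graph with
  | nil => simp [pvLookup] at h
  | cons p rest ih =>
    obtain ⟨k, v⟩ := p
    by_cases hk : (k == c) = true
    · simp only [pvLookup, hk, if_true, Option.some.injEq] at h
      subst h
      intro n hn
      rw [List.flatMap_cons]
      exact List.mem_append_left _ hn
    · simp only [pvLookup, hk, Bool.false_eq_true, if_false] at h
      intro n hn
      rw [List.flatMap_cons]
      exact List.mem_append_right _ (ih h n hn)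

theorem pvLookup_len {graph : List (Int × List Int)} {c : Int} {l : List Int}
    (h : pvLookup graph c = some l) : l.length ≤ (graph.flatMap Prod.snd).length := by
  induction graph with
  | nil => simp [pvLookup] at h
  | cons p rest ih =>
    obtain ⟨k, v⟩ := p
    by_cases hk : (k == c) = true
    · simp only [pvLookup, hk, if_true, Option.some.injEq] at h
      subst h
      rw [List.flatMap_cons, List.length_append]
      dsimp only
      omega
    · simp only [pvLookup, hk, Bool.false_eq_true, if_false] at h
      have := ih h
      rw [List.flatMap_cons, List.length_append]
      omega

theorem pv_card_lt {U' U V : Finset Int} {c : Int}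
    (h1 : U' ⊆ U) (h2 : c ∈ U) (h3 : c ∉ V) :
    (U' \ insert c V).card < (U \ V).card := by
  have hsub : U' \ insert c V ⊆ (U \ V).erase c := by
    intro x hx
    simp only [Finset.mem_sdiff, Finset.mem_insert, Finset.mem_erase] at hx ⊢
    exact ⟨fun hxc => hx.2 (Or.inl hxc), h1 hx.1, fun hv => hx.2 (Or.inr hv)⟩
  have hc : c ∈ U \ V := Finset.mem_sdiff.mpr ⟨h2, h3⟩
  have h4 := Finset.card_le_card hsub
  have h5 := Finset.card_erase_of_mem hc
  have h6 : 0 < (U \ V).card := Finset.card_pos.mpr ⟨c, hc⟩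
  omega

theorem pvALoop_dec_skip (graph : List (Int × List Int)) (visited : PySem.Set Int) (current : Int)
    (rest : List Int) (h : PySem.Set.contains visited current = true) :
    ((rest ++ List.flatMap Prod.snd graph).toFinset \ List.toFinset visited).card *
        (1 + (List.flatMap Prod.snd graph).length) + rest.length <
      ((current :: rest ++ List.flatMap Prod.snd graph).toFinset \ List.toFinset visited).card *
        (1 + (List.flatMap Prod.snd graph).length) + (current :: rest).length := by
  have hsub : (rest ++ graph.flatMap Prod.snd).toFinset ⊆
      (current :: rest ++ graph.flatMap Prod.snd).toFinset := by
    intro y hy; simp only [List.toFinset_append, List.toFinset_cons] at hy ⊢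
    simp only [Finset.mem_union, Finset.mem_insert] at hy ⊢
    tauto
  have h1 := Finset.card_le_card (Finset.sdiff_subset_sdiff hsub (Finset.Subset.refl visited.toFinset))
  have h2 := Nat.mul_le_mul_right (1 + (graph.flatMap Prod.snd).length) h1
  simp only [List.length_cons]
  omega

theorem pvALoop_dec_some (graph : List (Int × List Int)) (visited : PySem.Set Int) (current : Int)
    (rest : List Int) (h : ¬ PySem.Set.contains visited current = true) (kids : List Int)
    (hlk : pvLookup graph current = some kids) :
    ((rest ++ List.filter (fun n => !(PySem.Set.contains (PySem.Set.add visited current) n)) kids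
          ++ List.flatMap Prod.snd graph).toFinset \ List.toFinset (PySem.Set.add visited current)).card *
        (1 + (List.flatMap Prod.snd graph).length)
        + (rest ++ List.filter (fun n => !(PySem.Set.contains (PySem.Set.add visited current) n)) kids).length <
      ((current :: rest ++ List.flatMap Prod.snd graph).toFinset \ List.toFinset visited).card *
        (1 + (List.flatMap Prod.snd graph).length) + (current :: rest).length := by
  have hcur : current ∉ visited := by simpa using h
  have hadd : PySem.Set.add visited current = visited ++ [current] :=
    PySem.Set.add_of_not_mem hcur
  have hVF : (PySem.Set.add visited current).toFinset = insert current visited.toFinset := by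
    rw [hadd]; ext y; simp [or_comm]
  have hU' : (rest ++ List.filter (fun n => !(PySem.Set.contains (PySem.Set.add visited current) n)) kids
        ++ graph.flatMap Prod.snd).toFinset ⊆
      (current :: rest ++ graph.flatMap Prod.snd).toFinset := by
    intro y hy
    simp only [List.toFinset_append, List.toFinset_cons, Finset.mem_union, Finset.mem_insert,
      List.mem_toFinset] at hy ⊢
    have hk : y ∈ List.filter (fun n => !(PySem.Set.contains (PySem.Set.add visited current) n)) kids →
        y ∈ graph.flatMap Prod.snd :=
      fun hyf => pvLookup_mem hlk y (List.mem_of_mem_filter hyf)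
    tauto
  have hcU : current ∈ (current :: rest ++ graph.flatMap Prod.snd).toFinset := by simp
  have hcV : current ∉ visited.toFinset := by simpa using hcur
  have hlt := pv_card_lt hU' hcU hcV
  rw [hVF]
  have hmul := Nat.mul_le_mul_right (1 + (graph.flatMap Prod.snd).length) hlt
  rw [Nat.succ_mul] at hmul
  have hflen := List.length_filter_le (fun n => !(PySem.Set.contains (PySem.Set.add visited current) n)) kids
  have hklen := pvLookup_len hlk
  simp only [List.length_append, List.length_cons]
  omega

theorem pvALoop_dec_none (graph : List (Int × List Int)) (visited : PySem.Set Int) (current : Int)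
    (rest : List Int) (h : ¬ PySem.Set.contains visited current = true) :
    ((rest ++ List.flatMap Prod.snd graph).toFinset \ List.toFinset (PySem.Set.add visited current)).card *
        (1 + (List.flatMap Prod.snd graph).length) + rest.length <
      ((current :: rest ++ List.flatMap Prod.snd graph).toFinset \ List.toFinset visited).card *
        (1 + (List.flatMap Prod.snd graph).length) + (current :: rest).length := by
  have hcur : current ∉ visited := by simpa using h
  have hadd : PySem.Set.add visited current = visited ++ [current] :=
    PySem.Set.add_of_not_mem hcur
  have hVF : (PySem.Set.add visited current).toFinset = insert current visited.toFinset := by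
    rw [hadd]; ext y; simp [or_comm]
  have hU' : (rest ++ graph.flatMap Prod.snd).toFinset ⊆
      (current :: rest ++ graph.flatMap Prod.snd).toFinset := by
    intro y hy; simp only [List.toFinset_append, List.toFinset_cons] at hy ⊢
    simp only [Finset.mem_union, Finset.mem_insert] at hy ⊢
    tauto
  have hcU : current ∈ (current :: rest ++ graph.flatMap Prod.snd).toFinset := by simp
  have hcV : current ∉ visited.toFinset := by simpa using hcur
  have hlt := pv_card_lt hU' hcU hcV
  rw [hVF]
  have hmul := Nat.mul_le_mul_right (1 + (graph.flatMap Prod.snd).length) (Nat.le_of_lt hlt)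
  simp only [List.length_cons]
  omega

-- ===== PORT A =====
def pvALoop (graph : List (Int × List Int)) (queue : List Int)
    (visited : PySem.Set Int) (result : List Int) : List Int :=
  match queue with
  | [] => result
  | current :: rest =>
    if PySem.Set.contains visited current then
      pvALoop graph rest visited result
    else
      match hlk : pvLookup graph current with
      | some kids =>
          pvALoop graph
            (rest ++ kids.filter (fun n => !(PySem.Set.contains (PySem.Set.add visited current) n)))
            (PySem.Set.add visited current) (result ++ [current])
      | none => pvALoop graph rest (PySem.Set.add visited current) (result ++ [current])
termination_by
  (((queue ++ graph.flatMap Prod.snd).toFinset \ visited.toFinset).card)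
    * (1 + (graph.flatMap Prod.snd).length) + queue.length
decreasing_by
  · exact pvALoop_dec_skip graph visited current rest (by assumption)
  · exact pvALoop_dec_some graph visited current rest (by assumption) kids hlk
  · exact pvALoop_dec_none graph visited current rest (by assumption)

def collect_affected_ids (root_id : Int) (graph : List (Int × List Int)) : List Int :=
  let queue : List Int :=
    match pvLookup graph root_id with
    | some items => items.foldl (fun q item => q ++ [item]) []
    | none => []
  pvALoop graph queue PySem.Set.empty []

-- ===== PORT B =====
def pvBPush : PySem.Set Int → List Int → List Int → PySem.Set Int × List Int
  | enq, res, [] => (enq, res)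
  | enq, res, n :: ns =>
    if PySem.Set.contains enq n then pvBPush enq res ns
    else pvBPush (PySem.Set.add enq n) (res ++ [n]) ns

-- the sublist of newly seen elements kept by one pass of pvBPush, used to
-- state its effect (cited by pvBLoop's termination proof and by the equivalence proof)
def pvF (V : List Int) : List Int → List Int
  | [] => []
  | x :: xs => if PySem.Set.contains V x then pvF V xs else x :: pvF (V ++ [x]) xs

theorem pvBPush_eq (kids : List Int) : ∀ (enq res : List Int),
    pvBPush enq res kids = (enq ++ pvF enq kids, res ++ pvF enq kids) := by
  induction kids with
  | nil => intro enq res; simp [pvBPush, pvF]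
  | cons n ns ih =>
    intro enq res
    by_cases hn : n ∈ enq
    · simp [pvBPush, pvF, hn, ih]
    · have hadd : PySem.Set.add enq n = enq ++ [n] := PySem.Set.add_of_not_mem hn
      simp only [pvBPush, pvF, PySem.Set.contains_eq_listContains, List.contains_iff_mem, hn,
        decide_false, Bool.false_eq_true, if_false, hadd]
      rw [ih]
      simp [List.append_assoc]

theorem pvF_props (l : List Int) : ∀ (V : List Int),
    (pvF V l).Nodup ∧ ∀ x ∈ pvF V l, x ∉ V ∧ x ∈ l := by
  induction l with
  | nil => intro V; simp [pvF]
  | cons x xs ih =>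
    intro V
    by_cases hx : x ∈ V
    · obtain ⟨h1, h2⟩ := ih V
      have hrw : pvF V (x :: xs) = pvF V xs := by simp [pvF, hx]
      rw [hrw]
      exact ⟨h1, fun y hy => ⟨(h2 y hy).1, List.mem_cons_of_mem _ (h2 y hy).2⟩⟩
    · obtain ⟨h1, h2⟩ := ih (V ++ [x])
      have hrw : pvF V (x :: xs) = x :: pvF (V ++ [x]) xs := by simp [pvF, hx]
      rw [hrw]
      refine ⟨List.nodup_cons.mpr ⟨fun hmem => (h2 x hmem).1 (by simp), h1⟩, ?_⟩
      intro y hy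
      rcases List.mem_cons.mp hy with rfl | hy'
      · exact ⟨hx, by simp⟩
      · have hp := h2 y hy'
        exact ⟨fun hyV => hp.1 (List.mem_append_left _ hyV), List.mem_cons_of_mem _ hp.2⟩

theorem pvB_measure_step {G enq P : List Int} (hP1 : P.Nodup)
    (hP2 : ∀ x ∈ P, x ∉ enq) (hP3 : ∀ x ∈ P, x ∈ G) :
    (G.toFinset \ (enq ++ P).toFinset).card + P.length = (G.toFinset \ enq.toFinset).card := by
  have hsub : P.toFinset ⊆ G.toFinset \ enq.toFinset := by
    intro x hx
    rw [List.mem_toFinset] at hx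
    rw [Finset.mem_sdiff, List.mem_toFinset, List.mem_toFinset]
    exact ⟨hP3 x hx, hP2 x hx⟩
  have heq : G.toFinset \ (enq ++ P).toFinset = (G.toFinset \ enq.toFinset) \ P.toFinset := by
    ext y
    simp only [Finset.mem_sdiff, List.toFinset_append, Finset.mem_union]
    tauto
  have h7 : P.toFinset ∩ (G.toFinset \ enq.toFinset) = P.toFinset := Finset.inter_eq_left.mpr hsub
  have hc : P.toFinset.card = P.length := List.toFinset_card_of_nodup hP1
  have hle := Finset.card_le_card hsub
  rw [heq, Finset.card_sdiff, h7, hc]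
  omega

theorem pvBLoop_dec (graph : List (Int × List Int)) (enq : PySem.Set Int) (res : List Int)
    (i : Nat) (h : i < res.length) :
    ((List.flatMap Prod.snd graph).toFinset \ List.toFinset
          (pvBPush enq res ((pvLookup graph res[i]).getD [])).1).card +
        (pvBPush enq res ((pvLookup graph res[i]).getD [])).2.length - (i + 1) <
      ((List.flatMap Prod.snd graph).toFinset \ List.toFinset enq).card + res.length - i := by
  have hkids : ∀ n ∈ (pvLookup graph res[i]).getD [], n ∈ graph.flatMap Prod.snd := by
    cases hl : pvLookup graph res[i] with
    | none => simp
    | some l => simpa using pvLookup_mem hl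
  obtain ⟨hnd, hprop⟩ := pvF_props ((pvLookup graph res[i]).getD []) enq
  have hstep := pvB_measure_step hnd (fun x hx => (hprop x hx).1)
    (fun x hx => hkids x (hprop x hx).2)
  simp only [pvBPush_eq, List.length_append]
  omega

def pvBLoop (graph : List (Int × List Int)) (enq : PySem.Set Int)
    (res : List Int) (i : Nat) : List Int :=
  if h : i < res.length then
    let st := pvBPush enq res ((pvLookup graph res[i]).getD [])
    pvBLoop graph st.1 st.2 (i + 1)
  else res
termination_by ((graph.flatMap Prod.snd).toFinset \ enq.toFinset).card + res.length - i
decreasing_by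
  exact pvBLoop_dec graph enq res i h

def collect_affected_ids_alt (root_id : Int) (graph : List (Int × List Int)) : List Int :=
  let st := pvBPush PySem.Set.empty [] ((pvLookup graph root_id).getD [])
  pvBLoop graph st.1 st.2 0

-- ===== PRECONDITION & SPEC =====
def Spec_collect_affected_ids (root_id : Int) (graph : List (Int × List Int)) (out : List Int) : Prop := out = collect_affected_ids_alt root_id graph
instance (root_id : Int) (graph : List (Int × List Int)) (out : List Int) : Decidable (Spec_collect_affected_ids root_id graph out) := by unfold Spec_collect_affected_ids; infer_instance

-- ===== CLAIM (what is proved, stated in full; the proofs are below) =====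
def Claim_equal_collect_affected_ids : Prop := ∀ (root_id : Int) (graph : List (Int × List Int)), Dom_collect_affected_ids root_id graph → Spec_collect_affected_ids root_id graph (collect_affected_ids root_id graph)

-- ===== LEMMAS AND PROOFS =====

theorem pvF_append (q1 : List Int) : ∀ (V q2 : List Int),
    pvF V (q1 ++ q2) = pvF V q1 ++ pvF (V ++ pvF V q1) q2 := by
  induction q1 with
  | nil => intro V q2; simp [pvF]
  | cons x xs ih =>
    intro V q2
    by_cases hx : x ∈ V
    · simp [pvF, hx, ih]
    · simp only [List.cons_append, pvF, PySem.Set.contains_eq_listContains]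
      simp only [List.contains_iff_mem, hx, decide_false, Bool.false_eq_true, if_false]
      rw [ih (V ++ [x]) q2]
      simp [List.append_assoc]

theorem pvF_filter (l : List Int) : ∀ (V V0 : List Int),
    (∀ x ∈ V0, x ∈ V) →
    pvF V (l.filter (fun n => !(decide (n ∈ V0)))) = pvF V l := by
  induction l with
  | nil => intro V V0 _; simp
  | cons x xs ih =>
    intro V V0 h
    by_cases h0 : x ∈ V0
    · have hv : x ∈ V := h x h0
      simp [pvF, h0, hv, ih V V0 h]
    · simp only [List.filter_cons, h0, decide_false, Bool.not_false, if_true]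
      by_cases hv : x ∈ V
      · simp [pvF, hv, ih V V0 h]
      · simp only [pvF, PySem.Set.contains_eq_listContains, List.contains_iff_mem, hv,
          decide_false, Bool.false_eq_true, if_false, List.cons.injEq, true_and]
        exact ih (V ++ [x]) V0 (fun y hy => List.mem_append_left _ (h y hy))

-- step (unfolding) lemmas for the two loops
theorem pvALoop_nil (graph : List (Int × List Int)) (v r : List Int) :
    pvALoop graph [] v r = r := by
  rw [pvALoop]

theorem pvALoop_skip {graph : List (Int × List Int)} {current : Int} {rest v r : List Int}
    (h : PySem.Set.contains v current = true) :
    pvALoop graph (current :: rest) v r = pvALoop graph rest v r := by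
  rw [pvALoop, if_pos h]

theorem pvALoop_some {graph : List (Int × List Int)} {current : Int} {rest v r kids : List Int}
    (h : ¬ PySem.Set.contains v current = true) (hlk : pvLookup graph current = some kids) :
    pvALoop graph (current :: rest) v r =
      pvALoop graph
        (rest ++ kids.filter (fun n => !(PySem.Set.contains (PySem.Set.add v current) n)))
        (PySem.Set.add v current) (r ++ [current]) := by
  rw [pvALoop]
  simp only [h, Bool.false_eq_true, if_false]
  split
  · rename_i kids' hlk'
    rw [hlk] at hlk'
    cases hlk'
    rfl
  · rename_i hlk'
    rw [hlk] at hlk'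
    cases hlk'

theorem pvALoop_none {graph : List (Int × List Int)} {current : Int} {rest v r : List Int}
    (h : ¬ PySem.Set.contains v current = true) (hlk : pvLookup graph current = none) :
    pvALoop graph (current :: rest) v r =
      pvALoop graph rest (PySem.Set.add v current) (r ++ [current]) := by
  rw [pvALoop]
  simp only [h, Bool.false_eq_true, if_false]
  split
  · rename_i kids' hlk'
    rw [hlk] at hlk'
    cases hlk'
  · rfl

theorem pvBLoop_stop {graph : List (Int × List Int)} {enq res : List Int} {i : Nat}
    (h : ¬ i < res.length) : pvBLoop graph enq res i = res := by
  rw [pvBLoop]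
  simp [h]

theorem pvBLoop_step {graph : List (Int × List Int)} {enq res : List Int} {i : Nat}
    (h : i < res.length) :
    pvBLoop graph enq res i =
      pvBLoop graph (pvBPush enq res ((pvLookup graph res[i]).getD [])).1
        (pvBPush enq res ((pvLookup graph res[i]).getD [])).2 (i + 1) := by
  rw [pvBLoop]
  simp [h]

theorem pvMain (graph : List (Int × List Int)) :
    ∀ (queue visited result : List Int), visited = result →
    pvALoop graph queue visited result =
      pvBLoop graph (visited ++ pvF visited queue) (visited ++ pvF visited queue) result.length := by
  intro queue visited result
  induction queue, visited, result using pvALoop.induct graph with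
  | case1 visited result =>
    intro heq; subst heq
    rw [pvALoop_nil]
    simp only [pvF, List.append_nil]
    exact (pvBLoop_stop (by omega)).symm
  | case2 visited result current rest hcon ih =>
    intro heq; subst heq
    have hc' : current ∈ visited := by simpa using hcon
    have hF : pvF visited (current :: rest) = pvF visited rest := by simp [pvF, hc']
    rw [pvALoop_skip hcon, hF, ih rfl]
  | case3 visited result current rest hno kids hlk ih =>
    intro heq; subst heq
    have hcur : current ∉ visited := by simpa using hno
    have hadd : PySem.Set.add visited current = visited ++ [current] :=
      PySem.Set.add_of_not_mem hcur
    have hIH := ih hadd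
    rw [pvALoop_some hno hlk]
    simp only [hadd, PySem.Set.contains_eq_listContains, List.contains_eq_mem] at hIH ⊢
    rw [hIH]
    have hsplit : pvF (visited ++ [current])
          (rest ++ kids.filter (fun n => !(decide (n ∈ visited ++ [current])))) =
        pvF (visited ++ [current]) rest ++
          pvF ((visited ++ [current]) ++ pvF (visited ++ [current]) rest) kids := by
      rw [pvF_append]
      congr 1
      exact pvF_filter kids _ (visited ++ [current]) (fun x hx => List.mem_append_left _ hx)
    rw [hsplit]
    have hRY : visited ++ pvF visited (current :: rest) =
        (visited ++ [current]) ++ pvF (visited ++ [current]) rest := by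
      have hhd : pvF visited (current :: rest) = current :: pvF (visited ++ [current]) rest := by
        simp [pvF, hcur]
      rw [hhd]
      simp
    rw [hRY]
    have hlen : visited.length <
        ((visited ++ [current]) ++ pvF (visited ++ [current]) rest).length := by
      simp
    rw [pvBLoop_step hlen]
    have hget : ((visited ++ [current]) ++ pvF (visited ++ [current]) rest)[visited.length]'hlen
        = current := by
      simp [List.getElem_append]
    simp only [hget, hlk, Option.getD_some]
    rw [pvBPush_eq]
    simp [List.append_assoc]
  | case4 visited result current rest hno hlk ih =>
    intro heq; subst heq
    have hcur : current ∉ visited := by simpa using hno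
    have hadd : PySem.Set.add visited current = visited ++ [current] :=
      PySem.Set.add_of_not_mem hcur
    have hIH := ih hadd
    rw [pvALoop_none hno hlk]
    simp only [hadd] at hIH ⊢
    rw [hIH]
    have hRY : visited ++ pvF visited (current :: rest) =
        (visited ++ [current]) ++ pvF (visited ++ [current]) rest := by
      have hhd : pvF visited (current :: rest) = current :: pvF (visited ++ [current]) rest := by
        simp [pvF, hcur]
      rw [hhd]
      simp
    rw [hRY]
    have hlen : visited.length <
        ((visited ++ [current]) ++ pvF (visited ++ [current]) rest).length := by
      simp
    rw [pvBLoop_step hlen]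
    have hget : ((visited ++ [current]) ++ pvF (visited ++ [current]) rest)[visited.length]'hlen
        = current := by
      simp [List.getElem_append]
    simp only [hget, hlk, Option.getD_none]
    rw [pvBPush_eq]
    simp [pvF]

-- ===== VERDICT (by name: the statement is the Claim_ definition above) =====
theorem collect_affected_ids_spec : Claim_equal_collect_affected_ids := by
  intro root_id graph _
  unfold Spec_collect_affected_ids collect_affected_ids collect_affected_ids_alt
  rw [pvBPush_eq]
  cases hl : pvLookup graph root_id with
  | none =>
    simp only [hl, Option.getD_none]
    have hm := pvMain graph [] PySem.Set.empty [] rfl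
    simpa [pvF] using hm
  | some items =>
    simp only [hl, Option.getD_some, PySem.List.foldl_append_singleton_eq_self, List.nil_append]
    have hm := pvMain graph items PySem.Set.empty [] rfl
    simpa using hm
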